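-- pv_equiv track=rewrite | github.com/ItsLucas93/PRJ-SM601 | fonctions/D_3_ordonnancement.py | sort_table_by_rank
-- ===== SOURCE A (Python) =====
-- def sort_table_by_rank(str_tab, ranks):
--     """
--     * Fonction: sort_table_by_rank
--     * -----------------------------
--     * Tri du tableau par tri insertion, indexé par les rangs.
--     * :param str_tab: Tableau à trier
--     * :param ranks: Liste des rangs de tous les sommets du graphe
--     * :return: Tableau trié
--     """
--     # Créer une liste d'indices triés basés sur les rangs
--     sorted_indices = sorted(range(len(ranks)), key=lambda x: ranks[x])
--
--     # Réorganiser chaque ligne du tableau selon les indices triés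
--     sorted_str_tab = []
--     for line in str_tab:
--         # Conservation de l'en-tête de la colonne
--         sorted_line = [line[0]]
--         sorted_line.extend([line[i + 1] for i in sorted_indices])
--         sorted_str_tab.append(sorted_line)
--
--     return sorted_str_tab
-- ===== SOURCE B (Python) =====
-- def sort_table_by_rank(str_tab, ranks):
--     # Different decomposition: instead of computing a sorted index permutation and
--     # re-indexing every row, pair each row's data cells with their rank and stable-sort
--     # the pairs directly by rank.
--     return [
--         [line[0]] + [cell for _, cell in sorted(zip(ranks, line[1:]), key=lambda p: p[0])]
--         for line in str_tab
--     ]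
-- ===== Notes on version B (the rewrite author's own statement) =====
-- stated objective: alternative
-- what changed: B drops A's precomputed sorted index permutation and the nested re-indexing comprehension: each row's data cells are zipped with the ranks and stable-sorted by rank directly.
import Mathlib
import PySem

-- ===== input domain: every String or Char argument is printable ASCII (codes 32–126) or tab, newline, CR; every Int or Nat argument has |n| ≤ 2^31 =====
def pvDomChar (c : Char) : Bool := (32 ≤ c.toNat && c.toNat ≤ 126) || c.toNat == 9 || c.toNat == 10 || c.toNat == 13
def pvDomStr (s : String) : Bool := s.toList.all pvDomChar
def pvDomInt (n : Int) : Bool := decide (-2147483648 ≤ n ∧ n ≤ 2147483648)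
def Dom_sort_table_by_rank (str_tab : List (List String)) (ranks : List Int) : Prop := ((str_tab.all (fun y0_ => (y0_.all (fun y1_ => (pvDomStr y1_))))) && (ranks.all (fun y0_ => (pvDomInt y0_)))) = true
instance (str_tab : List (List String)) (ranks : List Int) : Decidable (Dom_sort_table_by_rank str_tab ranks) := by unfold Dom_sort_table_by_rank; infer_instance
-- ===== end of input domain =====

-- B replaces A's precomputed sorted index permutation + per-row re-indexing by
-- stable-sorting each row's (rank, cell) pairs directly: an alternative decomposition.


-- ===== PORT A =====
-- line[0] and line[i+1] via pyGetD: exact under Pre_ (every line has ≥ len(ranks)+1 cells,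
-- and each i comes from range(len(ranks))); ranks[x] via pyGetD: exact (x ∈ range(len(ranks))).
def sort_table_by_rank (str_tab : List (List String)) (ranks : List Int) : List (List String) :=
  let sorted_indices :=
    PySem.List.sorted (PySem.List.pyRange 0 (ranks.length : Int) 1)
      (fun x => PySem.List.pyGetD ranks x 0) false
  str_tab.foldl (fun acc line =>
    acc ++ [[PySem.List.pyGetD line 0 ""] ++
      sorted_indices.map (fun i => PySem.List.pyGetD line (i + 1) "")]) []

-- ===== PORT B =====
-- line[0] via pyGetD (exact under Pre_); line[1:] via slice; zip/sorted as in Source B.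
def sort_table_by_rank_alt (str_tab : List (List String)) (ranks : List Int) : List (List String) :=
  str_tab.map (fun line =>
    [PySem.List.pyGetD line 0 ""] ++
      (PySem.List.sorted (ranks.zip (PySem.List.slice line (some 1) none))
        (fun p => p.1) false).map (fun p => p.2))

-- ===== PRECONDITION & SPEC =====
-- Pre_ excludes exactly the inputs where A raises IndexError: a row shorter than
-- len(ranks)+1 (the header cell plus one cell per rank).
def Pre_sort_table_by_rank (str_tab : List (List String)) (ranks : List Int) : Prop :=
  ∀ line ∈ str_tab, ranks.length + 1 ≤ line.length
instance (str_tab : List (List String)) (ranks : List Int) : Decidable (Pre_sort_table_by_rank str_tab ranks) := by unfold Pre_sort_table_by_rank; infer_instance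

def pvWitness_sort_table_by_rank : List (List String) × List Int :=
  ([["T", "a", "b", "c"], ["R", "x", "y", "z"]], [2, 0, 1])

def Spec_sort_table_by_rank (str_tab : List (List String)) (ranks : List Int) (out : List (List String)) : Prop := out = sort_table_by_rank_alt str_tab ranks
instance (str_tab : List (List String)) (ranks : List Int) (out : List (List String)) : Decidable (Spec_sort_table_by_rank str_tab ranks out) := by unfold Spec_sort_table_by_rank; infer_instance

-- ===== CLAIM (what is proved, stated in full; the proofs are below) =====
def Claim_equal_sort_table_by_rank : Prop := ∀ (str_tab : List (List String)) (ranks : List Int), Dom_sort_table_by_rank str_tab ranks → Pre_sort_table_by_rank str_tab ranks → Spec_sort_table_by_rank str_tab ranks (sort_table_by_rank str_tab ranks)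

-- ===== LEMMAS AND PROOFS =====

-- mapping f commutes with insertion when the left ordering is the right one pulled back along f
theorem pv_insertBy_map {α β κ : Type} [LT κ] [DecidableLT κ] (f : α → β) (key : β → κ)
    (x : α) (ys : List α) :
    (PySem.List.insertBy (fun a b => decide (key (f a) < key (f b))) x ys).map f
      = PySem.List.insertBy (fun a b => decide (key a < key b)) (f x) (ys.map f) := by
  induction ys with
  | nil => simp [PySem.List.insertBy]
  | cons y ys ih =>
    by_cases h : key (f x) < key (f y) <;> simp [PySem.List.insertBy, h, ih]

theorem pv_foldl_insertBy_map {α β κ : Type} [LT κ] [DecidableLT κ] (f : α → β) (key : β → κ) :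
    ∀ (xs acc : List α),
      (xs.foldl (fun acc x =>
          PySem.List.insertBy (fun a b => decide (key (f a) < key (f b))) x acc) acc).map f
        = (xs.map f).foldl (fun acc y =>
            PySem.List.insertBy (fun a b => decide (key a < key b)) y acc) (acc.map f) := by
  intro xs
  induction xs with
  | nil => intro acc; simp
  | cons x xs ih =>
    intro acc
    simp only [List.foldl_cons, List.map_cons, ih, pv_insertBy_map]

-- stable sort commutes with map when the key factors through the map
theorem pv_sorted_map {α β κ : Type} [LT κ] [DecidableLT κ] (f : α → β) (key : β → κ)
    (xs : List α) :
    (PySem.List.sorted xs (fun a => key (f a)) false).map f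
      = PySem.List.sorted (xs.map f) key false := by
  rw [PySem.List.sorted_eq_foldl_insertBy, PySem.List.sorted_eq_foldl_insertBy]
  simpa using pv_foldl_insertBy_map f key xs []

theorem pv_zip_eq_map_range {α β : Type} (dα : α) (dβ : β) :
    ∀ (rs : List α) (ls : List β), rs.length ≤ ls.length →
      (List.range rs.length).map (fun k => (rs.getD k dα, ls.getD k dβ)) = rs.zip ls := by
  intro rs
  induction rs with
  | nil => intro ls _; simp
  | cons r rs ih =>
    intro ls h
    cases ls with
    | nil => simp at h
    | cons l ls =>
      simp only [List.length_cons, List.range_succ_eq_map, List.map_cons, List.map_map]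
      simp only [List.getD_cons_zero, List.zip_cons_cons]
      refine congrArg _ ?_
      have := ih ls (by simpa using h)
      simpa [Function.comp] using this

-- the per-row equality: A's re-indexing by the sorted index permutation equals
-- B's direct stable sort of the (rank, cell) pairs
theorem pv_row_eq (ranks : List Int) (line : List String)
    (h : ranks.length + 1 ≤ line.length) :
    (PySem.List.sorted (PySem.List.pyRange 0 (ranks.length : Int) 1)
        (fun x => PySem.List.pyGetD ranks x 0) false).map
      (fun i => PySem.List.pyGetD line (i + 1) "")
      = (PySem.List.sorted (ranks.zip (PySem.List.slice line (some 1) none))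
          (fun p => p.1) false).map (fun p => p.2) := by
  set f : Int → Int × String :=
    fun i => (PySem.List.pyGetD ranks i 0, PySem.List.pyGetD line (i + 1) "") with hf
  have hkey : (fun x => PySem.List.pyGetD ranks x 0) = fun a => (f a).1 := rfl
  have hmap : (fun i => PySem.List.pyGetD line (i + 1) "") = fun a => (f a).2 := rfl
  rw [hkey, hmap]
  have hsm := pv_sorted_map f (fun p : Int × String => p.1)
    (PySem.List.pyRange 0 (ranks.length : Int) 1)
  calc (PySem.List.sorted (PySem.List.pyRange 0 (ranks.length : Int) 1)
          (fun a => (f a).1) false).map (fun a => (f a).2)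
      = ((PySem.List.sorted (PySem.List.pyRange 0 (ranks.length : Int) 1)
          (fun a => (f a).1) false).map f).map (fun p => p.2) := by
        rw [List.map_map]; rfl
    _ = (PySem.List.sorted ((PySem.List.pyRange 0 (ranks.length : Int) 1).map f)
          (fun p => p.1) false).map (fun p => p.2) := by rw [hsm]
    _ = (PySem.List.sorted (ranks.zip (PySem.List.slice line (some 1) none))
          (fun p => p.1) false).map (fun p => p.2) := by
        refine congrArg (fun t => (PySem.List.sorted t (fun p : Int × String => p.1) false).map
          (fun p => p.2)) ?_
        rw [PySem.List.pyRange_zero_natCast, List.map_map, PySem.List.slice_from_one]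
        have htail : ranks.length ≤ line.tail.length := by
          cases line with
          | nil => simp at h
          | cons a ls => simpa using h
        rw [← pv_zip_eq_map_range (0 : Int) ("" : String) ranks line.tail htail]
        refine List.map_congr_left ?_
        intro k hk
        cases line with
        | nil => simp at h
        | cons a ls =>
          show f (k : Int) = (ranks.getD k 0, ls.getD k "")
          simp only [hf]
          have h2 : PySem.List.pyGetD (a :: ls) ((k : Int) + 1) "" = ls.getD k "" := by
            have hc : ((k : Int) + 1) = ((k + 1 : Nat) : Int) := by push_cast; ring
            rw [hc, PySem.List.pyGetD_natCast, List.getD_cons_succ]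
          rw [h2, PySem.List.pyGetD_natCast]

-- ===== VERDICT (by name: the statement is the Claim_ definition above) =====
theorem sort_table_by_rank_spec : Claim_equal_sort_table_by_rank := by
  intro str_tab ranks _ hpre
  unfold Spec_sort_table_by_rank sort_table_by_rank sort_table_by_rank_alt
  rw [PySem.List.foldl_append_singleton_eq_map]
  refine List.map_congr_left ?_
  intro line hline
  have h := hpre line hline
  rw [pv_row_eq ranks line h]
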